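-- pv_equiv track=rewrite | github.com/riqie/Aprendendo | Linguagens de Programação/Python/1. Introdução a Programação/Exercícios/Lista 10/M10L - EX15.py | conta_positivos_negativos
-- ===== SOURCE A (Python) =====
-- def conta_positivos_negativos(lista, cont=0, positivos=0, negativos=0):
--     if cont == len(lista):
--         return positivos == negativos
--
--     if lista[cont] > 0:
--         positivos += 1
--     elif lista[cont] < 0:
--         negativos += 1
--
--     return conta_positivos_negativos(lista, cont + 1, positivos, negativos)
-- ===== SOURCE B (Python) =====
-- def conta_positivos_negativos(lista, cont=0, positivos=0, negativos=0):
--     for i in range(cont, len(lista)):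
--         if lista[i] > 0:
--             positivos += 1
--         elif lista[i] < 0:
--             negativos += 1
--     return positivos == negativos
-- ===== Notes on version B (the rewrite author's own statement) =====
-- stated objective: simpler
-- what changed: Replaces the tail recursion that rebuilds the accumulators through call frames with a single for-loop over range(cont, len(lista)) updating the two counters in place.
import Mathlib
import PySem

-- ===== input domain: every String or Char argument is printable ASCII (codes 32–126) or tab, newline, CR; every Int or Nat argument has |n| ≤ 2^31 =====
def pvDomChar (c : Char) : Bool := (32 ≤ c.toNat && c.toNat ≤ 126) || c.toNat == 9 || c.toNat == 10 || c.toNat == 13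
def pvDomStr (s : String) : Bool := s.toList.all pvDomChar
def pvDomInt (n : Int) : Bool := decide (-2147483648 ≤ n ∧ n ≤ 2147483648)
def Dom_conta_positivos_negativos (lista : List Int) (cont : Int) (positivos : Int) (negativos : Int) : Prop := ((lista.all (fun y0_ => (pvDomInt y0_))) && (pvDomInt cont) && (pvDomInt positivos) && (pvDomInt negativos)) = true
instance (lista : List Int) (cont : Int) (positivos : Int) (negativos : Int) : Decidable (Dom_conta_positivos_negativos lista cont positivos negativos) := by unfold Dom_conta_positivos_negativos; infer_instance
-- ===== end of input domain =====

-- B replaces A's tail recursion with a single loop over range(cont, len(lista)) updating two counters (simpler, O(1) space).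


-- ===== PORT A =====
-- literal port of A's recursion; the `none` branch is Python's IndexError (excluded by Pre_)
def conta_positivos_negativos (lista : List Int) (cont : Int) (positivos : Int) (negativos : Int) : Bool :=
  if cont = (lista.length : Int) then positivos == negativos
  else
    match h : PySem.List.pyGet? lista cont with
    | none => false   -- IndexError
    | some x =>
      if x > 0 then conta_positivos_negativos lista (cont + 1) (positivos + 1) negativos
      else if x < 0 then conta_positivos_negativos lista (cont + 1) positivos (negativos + 1)
      else conta_positivos_negativos lista (cont + 1) positivos negativos
termination_by ((lista.length : Int) - cont).toNat
decreasing_by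
  all_goals
    have hin : ¬ PySem.List.pyGet? lista cont = none := by simp [h]
    rw [PySem.List.pyGet?_eq_none_iff] at hin
    simp [PySem.Raise.InRange] at hin
    omega

-- ===== PORT B =====
-- literal port of Source B's loop; the `none` branch of the lookup only totalises the function
-- (inside Pre_ every visited index is in range, as in the Python loop)
def conta_positivos_negativos_alt (lista : List Int) (cont : Int) (positivos : Int) (negativos : Int) : Bool :=
  let step := fun (acc : Int × Int) (i : Int) =>
    match PySem.List.pyGet? lista i with
    | some x =>
        if x > 0 then (acc.1 + 1, acc.2)
        else if x < 0 then (acc.1, acc.2 + 1)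
        else acc
    | none => acc
  let r := (PySem.List.pyRange cont (lista.length : Int) 1).foldl step (positivos, negativos)
  r.1 == r.2

-- ===== PRECONDITION & SPEC =====
-- Pre_ excludes exactly the inputs where A raises IndexError: cont > len(lista) (base case never reached)
-- or cont < -len(lista) (lista[cont] out of range even with Python's negative-index wraparound).
def Pre_conta_positivos_negativos (lista : List Int) (cont : Int) (positivos : Int) (negativos : Int) : Prop :=
  -(lista.length : Int) ≤ cont ∧ cont ≤ (lista.length : Int)
instance (lista : List Int) (cont : Int) (positivos : Int) (negativos : Int) : Decidable (Pre_conta_positivos_negativos lista cont positivos negativos) := by unfold Pre_conta_positivos_negativos; infer_instance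
def pvWitness_conta_positivos_negativos : List Int × Int × Int × Int := ([3, -1, 0, 2], 0, 0, 0)

def Spec_conta_positivos_negativos (lista : List Int) (cont : Int) (positivos : Int) (negativos : Int) (out : Bool) : Prop := out = conta_positivos_negativos_alt lista cont positivos negativos
instance (lista : List Int) (cont : Int) (positivos : Int) (negativos : Int) (out : Bool) : Decidable (Spec_conta_positivos_negativos lista cont positivos negativos out) := by unfold Spec_conta_positivos_negativos; infer_instance

-- ===== CLAIM (what is proved, stated in full; the proofs are below) =====
def Claim_equal_conta_positivos_negativos : Prop := ∀ (lista : List Int) (cont : Int) (positivos : Int) (negativos : Int), Dom_conta_positivos_negativos lista cont positivos negativos → Pre_conta_positivos_negativos lista cont positivos negativos → Spec_conta_positivos_negativos lista cont positivos negativos (conta_positivos_negativos lista cont positivos negativos)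

-- ===== LEMMAS AND PROOFS =====
lemma conta_key (lista : List Int) :
    ∀ (n : Nat) (cont positivos negativos : Int),
      ((lista.length : Int) - cont).toNat = n →
      -(lista.length : Int) ≤ cont → cont ≤ (lista.length : Int) →
      conta_positivos_negativos lista cont positivos negativos
        = conta_positivos_negativos_alt lista cont positivos negativos := by
  intro n
  induction n with
  | zero =>
    intro cont positivos negativos hn h1 h2
    have hc : cont = (lista.length : Int) := by omega
    rw [conta_positivos_negativos, conta_positivos_negativos_alt]
    simp [hc, PySem.List.pyRange_one_eq_nil (le_refl _)]
  | succ n ih =>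
    intro cont positivos negativos hn h1 h2
    have hc : cont < (lista.length : Int) := by omega
    have hne : ¬ cont = (lista.length : Int) := by omega
    have hsome : ¬ PySem.List.pyGet? lista cont = none := by
      rw [PySem.List.pyGet?_eq_none_iff]
      simp [PySem.Raise.InRange]
      omega
    obtain ⟨x, hx⟩ := Option.ne_none_iff_exists'.mp hsome
    have hstep : ((lista.length : Int) - (cont + 1)).toNat = n := by omega
    rw [conta_positivos_negativos]
    simp only [hne, if_false]
    split
    · next heq => rw [heq] at hx; cases hx
    · next y heq =>
      have hy : y = x := by rw [heq] at hx; exact Option.some.inj hx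
      subst hy
      rw [conta_positivos_negativos_alt]
      simp only [PySem.List.pyRange_one_cons hc, List.foldl_cons, hx]
      split_ifs with hpos hneg
      · rw [ih (cont + 1) (positivos + 1) negativos hstep (by omega) (by omega),
          conta_positivos_negativos_alt]
      · rw [ih (cont + 1) positivos (negativos + 1) hstep (by omega) (by omega),
          conta_positivos_negativos_alt]
      · rw [ih (cont + 1) positivos negativos hstep (by omega) (by omega),
          conta_positivos_negativos_alt]

-- ===== VERDICT (by name: the statement is the Claim_ definition above) =====
theorem conta_positivos_negativos_spec : Claim_equal_conta_positivos_negativos := by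
  intro lista cont positivos negativos _ hpre
  exact conta_key lista _ cont positivos negativos rfl hpre.1 hpre.2
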